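-- pv_equiv track=rewrite | github.com/SmileLaughter/Grammer-Analysis | src/utils/derivation_generator.py | _highlight_position
-- ===== SOURCE A (Python) =====
-- from typing import List, Tuple, Optional
--
-- def _highlight_position(sentential_form: List[str], position: int, length: int) -> str:
--     """
--     高亮显示替换位置
--     :param sentential_form: 句型
--     :param position: 替换起始位置
--     :param length: 替换长度
--     :return: 高亮后的字符串
--     """
--     result = []
--     for i, symbol in enumerate(sentential_form):
--         if position <= i < position + length:
--             result.append(f"[bold red]{symbol}[/bold red]")
--         else:
--             result.append(symbol)
--     return ' '.join(result)
-- ===== SOURCE B (Python) =====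
-- def _highlight_position(sentential_form, position, length):
--     """Slice-based: prefix, wrapped middle, suffix — no per-element index test."""
--     start = max(position, 0)
--     end = max(position + length, start)
--     prefix = sentential_form[:start]
--     middle = [f"[bold red]{s}[/bold red]" for s in sentential_form[start:end]]
--     suffix = sentential_form[end:]
--     return ' '.join(prefix + middle + suffix)
-- ===== Notes on version B (the rewrite author's own statement) =====
-- stated objective: simpler
-- what changed: Replaced the per-element enumerate loop with an index test by a three-slice decomposition (prefix, wrapped middle, suffix) joined once; bounds are normalised with max so all integer positions/lengths behave as A's index test.
import Mathlib
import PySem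

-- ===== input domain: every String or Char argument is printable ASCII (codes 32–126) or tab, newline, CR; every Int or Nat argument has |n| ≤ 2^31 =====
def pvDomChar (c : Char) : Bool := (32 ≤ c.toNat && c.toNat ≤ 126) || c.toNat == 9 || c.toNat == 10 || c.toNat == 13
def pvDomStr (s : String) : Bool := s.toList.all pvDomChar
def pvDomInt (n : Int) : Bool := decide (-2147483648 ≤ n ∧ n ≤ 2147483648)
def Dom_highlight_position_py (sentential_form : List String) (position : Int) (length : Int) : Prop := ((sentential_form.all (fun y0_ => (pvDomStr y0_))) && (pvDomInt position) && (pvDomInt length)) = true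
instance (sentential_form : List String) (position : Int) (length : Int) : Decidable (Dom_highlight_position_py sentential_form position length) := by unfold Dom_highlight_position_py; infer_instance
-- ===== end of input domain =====

-- B replaces A's per-element index-test loop by a three-slice decomposition (prefix, wrapped middle, suffix); objective: simpler.

-- ===== PORT A =====
-- f"[bold red]{symbol}[/bold red]"
def pvWrap (s : String) : String := String.ofList ("[bold red]".toList ++ s.toList ++ "[/bold red]".toList)

def highlight_position_py (sentential_form : List String) (position : Int) (length : Int) : String :=
  let result := (PySem.List.enumerate sentential_form).foldl
    (fun r (p : Int × String) =>
      if position ≤ p.1 ∧ p.1 < position + length then r ++ [pvWrap p.2] else r ++ [p.2]) []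
  PySem.Str.join " " result

-- ===== PORT B =====
def highlight_position_py_alt (sentential_form : List String) (position : Int) (length : Int) : String :=
  let start := max position 0
  let stop := max (position + length) start
  let pre := PySem.List.slice sentential_form none (some start)
  let mid := (PySem.List.slice sentential_form (some start) (some stop)).map pvWrap
  let suf := PySem.List.slice sentential_form (some stop) none
  PySem.Str.join " " (pre ++ mid ++ suf)

-- ===== PRECONDITION & SPEC =====
def Spec_highlight_position_py (sentential_form : List String) (position : Int) (length : Int) (out : String) : Prop := out = highlight_position_py_alt sentential_form position length
instance (sentential_form : List String) (position : Int) (length : Int) (out : String) : Decidable (Spec_highlight_position_py sentential_form position length out) := by unfold Spec_highlight_position_py; infer_instance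

-- ===== CLAIM (what is proved, stated in full; the proofs are below) =====
def Claim_equal_highlight_position_py : Prop := ∀ (sentential_form : List String) (position : Int) (length : Int), Dom_highlight_position_py sentential_form position length → Spec_highlight_position_py sentential_form position length (highlight_position_py sentential_form position length)

-- ===== LEMMAS AND PROOFS =====

-- generalized over the enumerate start index s: A's index-filtered map equals B's three-part decomposition
theorem pv_keyS (sf : List String) (s pos len : Int) :
    (PySem.List.enumerate sf s).map
      (fun p : Int × String => if pos ≤ p.1 ∧ p.1 < pos + len then pvWrap p.2 else p.2)
    = sf.take (max (pos - s) 0).toNat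
      ++ ((sf.drop (max (pos - s) 0).toNat).take
            ((max (pos + len - s) (max (pos - s) 0)).toNat - (max (pos - s) 0).toNat)).map pvWrap
      ++ sf.drop (max (pos + len - s) (max (pos - s) 0)).toNat := by
  induction sf generalizing s with
  | nil => simp [PySem.List.enumerate_nil]
  | cons x xs ih =>
    rw [PySem.List.enumerate_cons, List.map_cons, ih (s+1)]
    obtain ⟨A, hA⟩ : ∃ A : ℕ, max (pos - s) 0 = (A : Int) := ⟨(max (pos - s) 0).toNat, by omega⟩
    obtain ⟨B, hB⟩ : ∃ B : ℕ, max (pos + len - s) (max (pos - s) 0) = (B : Int) :=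
      ⟨(max (pos + len - s) (max (pos - s) 0)).toNat, by omega⟩
    obtain ⟨A', hA'⟩ : ∃ A' : ℕ, max (pos - (s+1)) 0 = (A' : Int) := ⟨(max (pos - (s+1)) 0).toNat, by omega⟩
    obtain ⟨B', hB'⟩ : ∃ B' : ℕ, max (pos + len - (s+1)) (max (pos - (s+1)) 0) = (B' : Int) :=
      ⟨(max (pos + len - (s+1)) (max (pos - (s+1)) 0)).toNat, by omega⟩
    rw [hB, hA, hB', hA']
    simp only [Int.toNat_natCast]
    by_cases h1 : pos ≤ s
    · by_cases h2 : s < pos + len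
      · have hA0 : A = 0 := by omega
        have hA'0 : A' = 0 := by omega
        have hBB : B = B' + 1 := by omega
        simp [h1, h2, hA0, hA'0, hBB]
      · have hA0 : A = 0 := by omega
        have hA'0 : A' = 0 := by omega
        have hB0 : B = 0 := by omega
        have hB'0 : B' = 0 := by omega
        simp [h1, h2, hA0, hA'0, hB0, hB'0]
    · have hAA : A = A' + 1 := by omega
      have hBB : B = B' + 1 := by omega
      simp [h1, hAA, hBB, Nat.succ_sub_succ]

theorem highlight_spec_aux (sf : List String) (pos len : Int) :
    highlight_position_py sf pos len = highlight_position_py_alt sf pos len := by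
  simp only [highlight_position_py, highlight_position_py_alt]
  have hstart : (0:Int) ≤ max pos 0 := le_max_right _ _
  have hstop : (0:Int) ≤ max (pos + len) (max pos 0) := le_trans hstart (le_max_right _ _)
  rw [PySem.List.slice_to sf hstart, PySem.List.slice_toNat sf hstart hstop,
      PySem.List.slice_from sf hstop]
  have hfold : ((PySem.List.enumerate sf).foldl
      (fun r (p : Int × String) =>
        if pos ≤ p.1 ∧ p.1 < pos + len then r ++ [pvWrap p.2] else r ++ [p.2]) [])
      = (PySem.List.enumerate sf).map
        (fun p : Int × String => if pos ≤ p.1 ∧ p.1 < pos + len then pvWrap p.2 else p.2) := by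
    have : (fun (r : List String) (p : Int × String) =>
        if pos ≤ p.1 ∧ p.1 < pos + len then r ++ [pvWrap p.2] else r ++ [p.2])
        = (fun r p => r ++ [if pos ≤ p.1 ∧ p.1 < pos + len then pvWrap p.2 else p.2]) := by
      funext r p; split <;> rfl
    rw [this, PySem.List.foldl_append_singleton_eq_map]
    simp
  rw [hfold]
  have := pv_keyS sf 0 pos len
  simp only [sub_zero] at this
  rw [this]

-- ===== VERDICT (by name: the statement is the Claim_ definition above) =====
theorem highlight_position_py_spec : Claim_equal_highlight_position_py := by
  intro sf pos len _
  exact highlight_spec_aux sf pos len
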